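-- pv_equiv track=rewrite | github.com/Vetti-Vetto/project_root_dir | pygen/words/words_in_proteome.py | search_words_in_proteome
-- ===== SOURCE A (Python) =====
-- def search_words_in_proteome(words, sequences):
--     word_count = {}
--     for word in words:
--         word_count[word] = 0
--         for sequence in sequences.values():
--             if word in sequence:
--                 word_count[word] += 1
--                 break
--     return word_count
-- ===== SOURCE B (Python) =====
-- def search_words_in_proteome(words, sequences):
--     found = set()
--     pending = list(dict.fromkeys(words))
--     for sequence in sequences.values():
--         if not pending:
--             break
--         hits = [word for word in pending if word in sequence]
--         if hits:
--             found.update(hits)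
--             pending = [word for word in pending if word not in found]
--     return {word: (1 if word in found else 0) for word in words}
-- ===== Notes on version B (the rewrite author's own statement) =====
-- stated objective: alternative
-- what changed: Inverts the loop nesting: a single pass over the sequence values keeps a shrinking 'pending' word list and a 'found' set (filtering pending per sequence and stopping early when nothing is pending), then one dict comprehension builds the result, instead of A's per-word rescan of all sequence values with a break.
import Mathlib
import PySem

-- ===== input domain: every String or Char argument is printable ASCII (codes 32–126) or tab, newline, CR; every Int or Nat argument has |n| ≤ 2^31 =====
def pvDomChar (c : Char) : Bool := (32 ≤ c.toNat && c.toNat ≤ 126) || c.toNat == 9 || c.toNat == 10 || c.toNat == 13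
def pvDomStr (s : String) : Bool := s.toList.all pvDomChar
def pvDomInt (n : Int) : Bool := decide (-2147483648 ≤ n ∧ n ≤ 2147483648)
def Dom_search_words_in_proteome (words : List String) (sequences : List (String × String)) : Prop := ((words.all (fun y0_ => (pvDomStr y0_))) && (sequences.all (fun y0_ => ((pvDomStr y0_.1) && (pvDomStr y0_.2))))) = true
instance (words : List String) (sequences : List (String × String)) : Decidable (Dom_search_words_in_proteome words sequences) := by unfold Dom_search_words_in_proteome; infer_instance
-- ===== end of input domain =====

-- B inverts the loop nesting: one pass over the sequences maintaining a 'found' set of words,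
-- then a single dict comprehension builds the result (alternative decomposition, same cost).


-- ===== PORT A =====
-- inner 'for sequence in sequences.values(): if word in sequence: word_count[word] += 1; break'
def pvInnerA (word : String) (d : PySem.Dict String Int) : List String → PySem.Dict String Int
  | [] => d
  | s :: rest =>
    if PySem.Str.isIn word s then d.insert word (d.getD word 0 + 1)
    else pvInnerA word d rest

def search_words_in_proteome (words : List String) (sequences : List (String × String)) : List (String × Int) :=
  let vals := (PySem.Dict.ofList sequences).values
  (words.foldl (fun d word => pvInnerA word (d.insert word 0) vals) PySem.Dict.empty).items

-- ===== PORT B =====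
-- outer loop over sequences with 'if not pending: break' => structural recursion on the value list;
-- per sequence the pending words are split by two filters (hits / still pending)
def pvScanB : List String → PySem.Set String → List String → PySem.Set String
  | [], found, _pending => found
  | seq :: rest, found, pending =>
    if pending.isEmpty then found
    else
      let hits := pending.filter (fun word => PySem.Str.isIn word seq)
      if hits.isEmpty then pvScanB rest found pending
      else
        let found' := PySem.Set.update found hits
        pvScanB rest found' (pending.filter (fun word => !(PySem.Set.contains found' word)))

def search_words_in_proteome_alt (words : List String) (sequences : List (String × String)) : List (String × Int) :=
  let vals := (PySem.Dict.ofList sequences).values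
  let found := pvScanB vals PySem.Set.empty (PySem.List.dedup words)
  (words.foldl (fun d word => d.insert word (if PySem.Set.contains found word then (1:Int) else 0)) PySem.Dict.empty).items

-- ===== PRECONDITION & SPEC =====
def Spec_search_words_in_proteome (words : List String) (sequences : List (String × String)) (out : List (String × Int)) : Prop := out = search_words_in_proteome_alt words sequences
instance (words : List String) (sequences : List (String × String)) (out : List (String × Int)) : Decidable (Spec_search_words_in_proteome words sequences out) := by unfold Spec_search_words_in_proteome; infer_instance

-- ===== CLAIM (what is proved, stated in full; the proofs are below) =====
def Claim_equal_search_words_in_proteome : Prop := ∀ (words : List String) (sequences : List (String × String)), Dom_search_words_in_proteome words sequences → Spec_search_words_in_proteome words sequences (search_words_in_proteome words sequences)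

-- ===== LEMMAS AND PROOFS =====

-- A's inner loop: scan-with-break is an 'any' on an unchanged dict
theorem pvInnerA_eq (word : String) (d : PySem.Dict String Int) (vs : List String) :
    pvInnerA word d vs =
      if vs.any (fun s => PySem.Str.isIn word s) then d.insert word (d.getD word 0 + 1) else d := by
  induction vs with
  | nil => simp [pvInnerA]
  | cons s rest ih =>
    simp only [pvInnerA]
    rw [ih]
    by_cases h : PySem.Str.isIn word s = true
    · rw [if_pos h, if_pos (by rw [List.any_cons, h, Bool.true_or])]
    · have hf : PySem.Str.isIn word s = false := by simpa using h
      rw [if_neg h, List.any_cons, hf, Bool.false_or]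

-- A's outer step inserts the 0/1 indicator
theorem pvStepA_eq (word : String) (d : PySem.Dict String Int) (vals : List String) :
    pvInnerA word (d.insert word 0) vals =
      d.insert word (if vals.any (fun s => PySem.Str.isIn word s) then (1:Int) else 0) := by
  rw [pvInnerA_eq]
  by_cases h : vals.any (fun s => PySem.Str.isIn word s) = true
  · rw [if_pos h, if_pos h, PySem.Dict.getD_insert_self, PySem.Dict.insert_insert_self]
    norm_num
  · rw [if_neg h, if_neg h]

-- B's scan over the sequence values (with its early break): membership in the final 'found'
theorem pvScanB_mem :
    ∀ (vals : List String) (found : PySem.Set String) (pending : List String) (x : String),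
      x ∈ pvScanB vals found pending
        ↔ x ∈ found ∨ (x ∈ pending ∧ vals.any (fun s => PySem.Str.isIn x s) = true) := by
  intro vals
  induction vals with
  | nil => simp [pvScanB]
  | cons seq rest ih =>
    intro found pending x
    simp only [pvScanB]
    by_cases hp : pending.isEmpty
    · rw [if_pos hp]
      have : pending = [] := List.isEmpty_iff.mp hp
      subst this
      simp
    · rw [if_neg hp]
      by_cases hh : (pending.filter (fun word => PySem.Str.isIn word seq)).isEmpty
      · rw [if_pos hh, ih]
        have hfe : ∀ w ∈ pending, ¬(PySem.Str.isIn w seq = true) :=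
          List.filter_eq_nil_iff.mp (List.isEmpty_iff.mp hh)
        have hx := fun hp' => hfe x hp'
        rw [List.any_cons, Bool.or_eq_true]
        tauto
      · rw [if_neg hh, ih]
        have h1 : x ∈ PySem.Set.update found (pending.filter (fun word => PySem.Str.isIn word seq))
            ↔ x ∈ found ∨ (x ∈ pending ∧ PySem.Str.isIn x seq = true) := by
          rw [PySem.Set.mem_update, List.mem_filter]
        have h2 : x ∈ pending.filter (fun word =>
              !(PySem.Set.contains (PySem.Set.update found (pending.filter (fun word => PySem.Str.isIn word seq))) word))
            ↔ x ∈ pending ∧ ¬(x ∈ found ∨ (x ∈ pending ∧ PySem.Str.isIn x seq = true)) := by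
          rw [List.mem_filter, Bool.not_eq_eq_eq_not, Bool.not_true, ← h1]
          constructor
          · rintro ⟨hm, hc⟩
            refine ⟨hm, fun hmem => ?_⟩
            rw [(PySem.Set.contains_iff _ _).mpr hmem] at hc
            simp at hc
          · rintro ⟨hm, hnm⟩
            refine ⟨hm, ?_⟩
            rw [Bool.eq_false_iff]
            intro hct
            exact hnm ((PySem.Set.contains_iff _ _).mp hct)
        rw [h1, h2, List.any_cons, Bool.or_eq_true]
        tauto

-- the two dict-building folds agree once vals is abstracted
theorem pvMain (words : List String) (vals : List String) :
    (words.foldl (fun d word => pvInnerA word (d.insert word 0) vals) PySem.Dict.empty).items =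
    (words.foldl (fun d word => d.insert word
        (if PySem.Set.contains (pvScanB vals PySem.Set.empty (PySem.List.dedup words)) word
         then (1:Int) else 0)) PySem.Dict.empty).items := by
  congr 1
  apply PySem.List.foldl_congr_mem
  intro d word hw
  rw [pvStepA_eq]
  congr 1
  have hmem : (word ∈ pvScanB vals PySem.Set.empty (PySem.List.dedup words))
      ↔ vals.any (fun s => PySem.Str.isIn word s) = true := by
    rw [pvScanB_mem]
    simp [PySem.Set.empty, hw]
  by_cases h : vals.any (fun s => PySem.Str.isIn word s) = true
  · rw [if_pos h, if_pos ((PySem.Set.contains_iff _ _).mpr (hmem.mpr h))]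
  · rw [if_neg h, if_neg]
    intro hc
    exact h (hmem.mp ((PySem.Set.contains_iff _ _).mp hc))

-- ===== VERDICT (by name: the statement is the Claim_ definition above) =====
theorem search_words_in_proteome_spec : Claim_equal_search_words_in_proteome := by
  intro words sequences _
  exact pvMain words ((PySem.Dict.ofList sequences).values)
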